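-- pv_equiv track=rewrite | github.com/calan2023/PythonCiphers | cipher_conversion.py | get_most_frequent
-- ===== SOURCE A (Python) =====
-- def get_most_frequent(frequency):
--     '''Gets the most frequency letter/s and the frequency value/s.
--
--     Args:
--         frequency (dict): Dictionary containing the frequency of each letter
--         in a text string
--
--     Returns:
--         most_frequent (list): A list of tuples containing the most frequent
--         letter/s and the corresponding frequency value/s
--     '''
--
--     most_frequent = [(' ', 0)]
--     for key, value in frequency.items():
--         if value > most_frequent[0][1]:
--             most_frequent = [(key, value)]
--         elif value == most_frequent[0][1]:
--             most_frequent += [(key, value)]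
--     return most_frequent
-- ===== SOURCE B (Python) =====
-- def get_most_frequent(frequency):
--     items = [(' ', 0)] + list(frequency.items())
--     max_val = max(v for _, v in items)
--     return [(k, v) for k, v in items if v == max_val]
-- ===== Notes on version B (the rewrite author's own statement) =====
-- stated objective: simpler
-- what changed: Replaces A's running-max with reset-on-greater/append-on-equal accumulator by folding the (' ', 0) seed into the item list and doing compute-max then filter in two plain passes.
import Mathlib
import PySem

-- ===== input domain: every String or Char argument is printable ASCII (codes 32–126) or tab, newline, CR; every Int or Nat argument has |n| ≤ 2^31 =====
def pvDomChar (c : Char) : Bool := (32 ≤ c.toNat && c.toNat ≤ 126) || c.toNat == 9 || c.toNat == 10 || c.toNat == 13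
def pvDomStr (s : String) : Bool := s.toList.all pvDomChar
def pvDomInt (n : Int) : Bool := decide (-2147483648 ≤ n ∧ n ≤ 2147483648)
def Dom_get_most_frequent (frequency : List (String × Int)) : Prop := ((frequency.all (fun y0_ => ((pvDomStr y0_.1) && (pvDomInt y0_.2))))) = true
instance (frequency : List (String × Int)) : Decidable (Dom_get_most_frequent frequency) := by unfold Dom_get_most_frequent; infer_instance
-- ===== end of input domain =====

-- B folds A's (' ', 0) seed into the item list and does compute-max then filter in two passes,
-- instead of A's single pass with a reset-on-greater / append-on-equal accumulator.

-- ===== PORT A =====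
-- the accumulator is never empty, so most_frequent[0] is read as headD with an unreachable default
def get_most_frequent (frequency : List (String × Int)) : List (String × Int) :=
  frequency.foldl (fun most_frequent kv =>
    if kv.2 > (most_frequent.headD (" ", 0)).2 then [kv]
    else if kv.2 == (most_frequent.headD (" ", 0)).2 then most_frequent ++ [kv]
    else most_frequent) [(" ", 0)]

-- ===== PORT B =====
-- max(v for _, v in items) over the nonempty items list = fold of max starting from the seed's value 0
def get_most_frequent_alt (frequency : List (String × Int)) : List (String × Int) :=
  let items : List (String × Int) := (" ", 0) :: frequency
  let maxVal : Int := frequency.foldl (fun a kv => max a kv.2) 0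
  items.filter (fun kv => kv.2 == maxVal)

-- ===== PRECONDITION & SPEC =====
def Spec_get_most_frequent (frequency : List (String × Int)) (out : List (String × Int)) : Prop := out = get_most_frequent_alt frequency
instance (frequency : List (String × Int)) (out : List (String × Int)) : Decidable (Spec_get_most_frequent frequency out) := by unfold Spec_get_most_frequent; infer_instance

-- ===== CLAIM (what is proved, stated in full; the proofs are below) =====
def Claim_equal_get_most_frequent : Prop := ∀ (frequency : List (String × Int)), Dom_get_most_frequent frequency → Spec_get_most_frequent frequency (get_most_frequent frequency)

-- ===== LEMMAS AND PROOFS =====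

-- Invariant: if the accumulator's head value is m (the running max) and every accumulated entry
-- has value m, the remaining fold yields the old accumulator (iff the final max stays m)
-- followed by the entries of the rest whose value equals the final max.
theorem gmf_loop (rest : List (String × Int)) (m : Int) (acc : List (String × Int))
    (hhead : (acc.headD (" ", 0)).2 = m) (hall : ∀ kv ∈ acc, kv.2 = m) :
    rest.foldl (fun most_frequent kv =>
      if kv.2 > (most_frequent.headD (" ", 0)).2 then [kv]
      else if kv.2 == (most_frequent.headD (" ", 0)).2 then most_frequent ++ [kv]
      else most_frequent) acc
    = (if rest.foldl (fun a kv => max a kv.2) m = m then acc else [])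
      ++ rest.filter (fun kv => kv.2 == rest.foldl (fun a kv => max a kv.2) m) := by
  induction rest generalizing m acc with
  | nil => simp
  | cons kv rest ih =>
    have hmax : ∀ (l : List (String × Int)) (a b : Int), a ≤ b →
        a ≤ l.foldl (fun a kv => max a kv.2) b := by
      intro l
      induction l with
      | nil => intro a b h; simpa using h
      | cons x l ihl => intro a b h; simpa [List.foldl] using ihl a (max b x.2) (le_trans h (le_max_left _ _))
    by_cases hgt : kv.2 > m
    · have hM : max m kv.2 = kv.2 := max_eq_right (le_of_lt hgt)
      have hge : m < (kv :: rest).foldl (fun a kv => max a kv.2) m := by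
        simp only [List.foldl, hM]
        exact lt_of_lt_of_le hgt (hmax rest _ _ le_rfl)
      simp only [List.foldl, hM, List.filter, hhead]
      rw [if_pos hgt, ih kv.2 [kv] (by simp) (by simp)]
      have hne : ¬ rest.foldl (fun a kv => max a kv.2) kv.2 = m := by
        have := hmax rest kv.2 kv.2 le_rfl; omega
      by_cases hk : rest.foldl (fun a kv => max a kv.2) kv.2 = kv.2
      · simp [hk]; intro h; omega
      · have : ¬ (kv.2 == rest.foldl (fun a kv => max a kv.2) kv.2) = true := by
          simp; omega
        simp [hk, hne, this]
    · by_cases heq : kv.2 = m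
      · have hM' : max m kv.2 = m := by omega
        simp only [List.foldl, hM', hhead]
        rw [if_neg hgt, if_pos (by simp [heq] : (kv.2 == m) = true),
            ih m (acc ++ [kv]) (by cases acc with
              | nil => simp at hhead; simp [heq]
              | cons a l => simpa using hhead)
            (by intro x hx; rcases List.mem_append.mp hx with h | h
                · exact hall x h
                · simp at h; rw [h]; exact heq)]
        simp only [List.filter]
        by_cases hk : rest.foldl (fun a kv => max a kv.2) m = m
        · simp [hk, heq]
        · have h1 : ¬ (kv.2 == rest.foldl (fun a kv => max a kv.2) m) = true := by simp; omega
          simp [hk, h1]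
      · have hlt : kv.2 < m := by omega
        have hM' : max m kv.2 = m := by omega
        simp only [List.foldl, hM', hhead]
        rw [if_neg hgt, if_neg (by simp [heq] : ¬ (kv.2 == m) = true), ih m acc hhead hall]
        have hbig : m ≤ rest.foldl (fun a kv => max a kv.2) m := hmax rest _ _ le_rfl
        have : ¬ (kv.2 == rest.foldl (fun a kv => max a kv.2) m) = true := by simp; omega
        simp [List.filter, this]

-- ===== VERDICT (by name: the statement is the Claim_ definition above) =====
theorem get_most_frequent_spec : Claim_equal_get_most_frequent := by
  intro frequency _
  show get_most_frequent frequency = get_most_frequent_alt frequency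
  unfold get_most_frequent get_most_frequent_alt
  rw [gmf_loop frequency 0 [(" ", 0)] (by simp) (by simp)]
  simp only [List.filter]
  by_cases hk : frequency.foldl (fun a kv => max a kv.2) 0 = 0
  · simp [hk]

  · have : ¬ ((0:Int) == frequency.foldl (fun a kv => max a kv.2) 0) = true := by simp; omega
    simp [hk, this]
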